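-- pv_equiv track=rewrite | github.com/Vdimir/captcha-cv-lab | caplib.py | fund_cont_subsec
-- ===== SOURCE A (Python) =====
-- class IntervalBuilder:
--     def __init__(self):
--         self.beg = None
--         self.end = None
--         self.ints = []
--
--     def cont(self, val):
--         if self.beg is None:
--             self.beg = val
--         else:
--             self.end = val
--
--     def brk(self):
--         if self.end is not None:
--             self.ints.append((self.beg, self.end))
--         self.beg = None
--         self.end = None
--
-- def fund_cont_subsec(arr):
--     intervals = IntervalBuilder()
--     for i,a in enumerate(arr):
--         if a != 0:
--             intervals.cont(i)
--         else:
--             intervals.brk()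
--     intervals.brk()
--     return intervals.ints
-- ===== SOURCE B (Python) =====
-- def fund_cont_subsec(arr):
--     res = []
--     n = len(arr)
--     i = 0
--     while i < n:
--         j = i
--         while j < n and arr[j] != 0:
--             j += 1
--         if j - i >= 2:
--             res.append((i, j - 1))
--         i = max(j, i + 1)
--     return res
-- ===== Notes on version B (the rewrite author's own statement) =====
-- stated objective: alternative
-- what changed: Replaced the streaming IntervalBuilder state machine (per-element cont/brk on an Option-pair state) with an index-based run scanner: an inner while loop locates each maximal nonzero run at once and emits (start, end) directly when the run has length >= 2.
import Mathlib
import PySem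

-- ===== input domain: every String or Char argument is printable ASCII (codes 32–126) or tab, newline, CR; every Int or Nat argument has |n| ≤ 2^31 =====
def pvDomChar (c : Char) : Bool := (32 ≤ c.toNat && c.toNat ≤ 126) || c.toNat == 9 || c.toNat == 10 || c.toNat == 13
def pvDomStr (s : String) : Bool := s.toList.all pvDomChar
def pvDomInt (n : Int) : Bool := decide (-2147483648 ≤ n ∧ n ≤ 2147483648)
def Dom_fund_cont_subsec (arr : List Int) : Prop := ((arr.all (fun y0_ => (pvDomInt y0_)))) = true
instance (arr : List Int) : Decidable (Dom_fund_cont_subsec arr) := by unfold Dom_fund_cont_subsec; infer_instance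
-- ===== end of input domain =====

-- B differs from A in decomposition only (run scanner vs streaming state machine); same return value everywhere.

-- ===== PORT A =====
-- IntervalBuilder state: (beg, end, ints)
def PVState : Type := Option Int × Option Int × List (Int × Int)

def pvCont (s : PVState) (val : Int) : PVState :=
  match s with
  | (none, e, ints) => (some val, e, ints)
  | (some b, _, ints) => (some b, some val, ints)

-- brk: append (beg, end) iff end is not None; beg is always some when end is some,
-- so the getD 0 default is never the value appended.
def pvBrk (s : PVState) : PVState :=
  match s with
  | (bg, some e, ints) => (none, none, ints ++ [(bg.getD 0, e)])
  | (_, none, ints) => (none, none, ints)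

def fund_cont_subsec (arr : List Int) : List (Int × Int) :=
  let final := (PySem.List.enumerate arr 0).foldl
      (fun s (p : Int × Int) => if p.2 ≠ 0 then pvCont s p.1 else pvBrk s)
      (((none, none, []) : PVState))
  (pvBrk final).2.2

-- ===== PORT B =====
-- inner while:  while j < n and arr[j] != 0: j += 1
-- arr.getD j 0 is exact for arr[j]: the guard ensures j < arr.length.
def altSkipRun (arr : List Int) (j : Nat) : Nat :=
  if j < arr.length then
    if arr.getD j 0 ≠ 0 then altSkipRun arr (j + 1) else j
  else j
termination_by arr.length - j

-- outer while loop of Source B, state (i, res)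
def altLoop (arr : List Int) (i : Nat) (res : List (Int × Int)) : List (Int × Int) :=
  if i < arr.length then
    let j := altSkipRun arr i
    let res' := if 2 ≤ j - i then res ++ [((i : Int), (j : Int) - 1)] else res
    altLoop arr (max j (i + 1)) res'
  else res
termination_by arr.length - i
decreasing_by
  have : i + 1 ≤ max (altSkipRun arr i) (i + 1) := Nat.le_max_right _ _
  omega

def fund_cont_subsec_alt (arr : List Int) : List (Int × Int) :=
  altLoop arr 0 []

-- ===== PRECONDITION & SPEC =====
def Spec_fund_cont_subsec (arr : List Int) (out : List (Int × Int)) : Prop := out = fund_cont_subsec_alt arr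
instance (arr : List Int) (out : List (Int × Int)) : Decidable (Spec_fund_cont_subsec arr out) := by unfold Spec_fund_cont_subsec; infer_instance

-- ===== CLAIM (what is proved, stated in full; the proofs are below) =====
def Claim_equal_fund_cont_subsec : Prop := ∀ (arr : List Int), Dom_fund_cont_subsec arr → Spec_fund_cont_subsec arr (fund_cont_subsec arr)

-- ===== LEMMAS AND PROOFS =====

-- A's loop as structural recursion with explicit index
def goA (xs : List Int) (i : Int) (s : PVState) : PVState :=
  match xs with
  | [] => s
  | x :: t => goA t (i + 1) (if x ≠ 0 then pvCont s i else pvBrk s)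

theorem foldl_enumerate_goA (xs : List Int) (i : Int) (s : PVState) :
    (PySem.List.enumerate xs i).foldl
      (fun s (p : Int × Int) => if p.2 ≠ 0 then pvCont s p.1 else pvBrk s) s
    = goA xs i s := by
  induction xs generalizing i s with
  | nil => simp [PySem.List.enumerate_nil, goA]
  | cons x t ih =>
    simp only [PySem.List.enumerate_cons, List.foldl_cons, goA]
    exact ih _ _

theorem goA_append (ys zs : List Int) (i : Int) (s : PVState) :
    goA (ys ++ zs) i s = goA zs (i + ys.length) (goA ys i s) := by
  induction ys generalizing i s with
  | nil => simp [goA]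
  | cons y t ih =>
    simp only [List.cons_append, goA, ih, List.length_cons]
    have h1 : i + 1 + (t.length : Int) = i + ((t.length + 1 : Nat) : Int) := by push_cast; ring
    rw [h1]

theorem goA_runPend (ys : List Int) (h : ∀ y ∈ ys, y ≠ 0) (i b : Int) (p : Option Int)
    (acc : List (Int × Int)) :
    goA ys i (some b, p, acc)
      = (some b, if ys.isEmpty then p else some (i + ys.length - 1), acc) := by
  induction ys generalizing i p with
  | nil => simp [goA]
  | cons y t ih =>
    have hy : y ≠ 0 := h y (by simp)
    simp only [goA, if_pos hy, pvCont]
    rw [ih (fun z hz => h z (by simp [hz])) (i + 1) (some i)]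
    rcases t with _ | ⟨z, t'⟩
    · simp
    · simp only [List.isEmpty_cons, List.length_cons]
      push_cast
      ring_nf

theorem goA_runNone (ys : List Int) (hne : ys ≠ []) (h : ∀ y ∈ ys, y ≠ 0) (i : Int)
    (acc : List (Int × Int)) :
    goA ys i (none, none, acc)
      = (some i, if ys.length = 1 then none else some (i + ys.length - 1), acc) := by
  rcases ys with _ | ⟨y, t⟩
  · exact absurd rfl hne
  · have hy : y ≠ 0 := h y (by simp)
    simp only [goA, if_pos hy, pvCont]
    rw [goA_runPend t (fun z hz => h z (by simp [hz])) (i + 1) i none acc]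
    rcases t with _ | ⟨z, t'⟩
    · simp
    · simp only [List.isEmpty_cons, List.length_cons]
      push_cast
      ring_nf

theorem altSkipRun_eq (arr : List Int) (i : Nat) :
    altSkipRun arr i = i + ((arr.drop i).takeWhile (fun x => x != 0)).length := by
  by_cases h : i < arr.length
  · have hdrop : arr.drop i = arr[i] :: arr.drop (i + 1) := List.drop_eq_getElem_cons h
    have hget : arr.getD i 0 = arr[i] := List.getD_eq_getElem arr 0 h
    by_cases hz : arr[i] = 0
    · rw [altSkipRun, if_pos h, hget, hdrop]
      simp [hz]
    · rw [altSkipRun, if_pos h, hget, if_pos hz, hdrop]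
      rw [altSkipRun_eq arr (i + 1)]
      simp only [List.takeWhile_cons]
      simp [hz]
      omega
  · rw [altSkipRun, if_neg h, List.drop_eq_nil_of_le (by omega)]
    simp
termination_by arr.length - i
decreasing_by omega

theorem altSkipRun_stop (arr : List Int) (i : Nat) (h : altSkipRun arr i < arr.length) :
    arr.getD (altSkipRun arr i) 0 = 0 := by
  by_cases hi : i < arr.length
  · by_cases hz : arr.getD i 0 = 0
    · rw [altSkipRun, if_pos hi, if_neg (by simpa using hz)]
      exact hz
    · rw [altSkipRun, if_pos hi, if_pos hz] at h ⊢
      exact altSkipRun_stop arr (i + 1) h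
  · rw [altSkipRun, if_neg hi] at h
    omega
termination_by arr.length - i
decreasing_by omega

theorem main_lemma (arr : List Int) (i : Nat) (acc : List (Int × Int)) :
    (pvBrk (goA (arr.drop i) (i : Int) (none, none, acc))).2.2 = altLoop arr i acc := by
  by_cases h : i < arr.length
  · have hdrop : arr.drop i = arr[i] :: arr.drop (i + 1) := List.drop_eq_getElem_cons h
    have hget : arr.getD i 0 = arr[i] := List.getD_eq_getElem arr 0 h
    by_cases hz : arr[i] = 0
    · -- zero at i: one brk step on both sides
      have hskip : altSkipRun arr i = i := by
        rw [altSkipRun, if_pos h, hget]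
        simp [hz]
      rw [altLoop, if_pos h]
      simp only [hskip, show ¬ (2 ≤ i - i) from by omega, if_false,
        show max i (i + 1) = i + 1 from by omega]
      rw [hdrop]
      simp only [goA]
      rw [if_neg (by simp [hz])]
      simp only [pvBrk]
      have hrec := main_lemma arr (i + 1) acc
      push_cast at hrec
      exact hrec
    · -- nonzero at i: consume the whole run t at once
      set t := (arr.drop i).takeWhile (fun x => x != 0) with ht
      set r := (arr.drop i).dropWhile (fun x => x != 0) with hrdef
      have htr : arr.drop i = t ++ r := (List.takeWhile_append_dropWhile).symm
      have htcons : t = arr[i] :: (arr.drop (i + 1)).takeWhile (fun x => x != 0) := by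
        rw [ht, hdrop, List.takeWhile_cons, if_pos (by simp [hz])]
      have htne : t ≠ [] := by rw [htcons]; simp
      have htlen1 : 1 ≤ t.length := List.length_pos_iff.mpr htne
      have htlen_le : t.length ≤ arr.length - i := by
        have h1 := (List.takeWhile_prefix (p := fun x => x != 0) (l := arr.drop i)).length_le
        rw [List.length_drop] at h1
        exact h1
      have htall : ∀ y ∈ t, y ≠ 0 := by
        intro y hy
        have := List.mem_takeWhile_imp hy
        simpa using this
      have hskip : altSkipRun arr i = i + t.length := altSkipRun_eq arr i
      set j := i + t.length with hj
      have hdropj : arr.drop j = r := by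
        have hdd : arr.drop j = (arr.drop i).drop t.length := by
          rw [List.drop_drop]
        rw [hdd, htr, List.drop_left]
      have hA : goA (arr.drop i) (i : Int) (none, none, acc)
          = goA r ((i : Int) + t.length)
              (some (i : Int),
               (if t.length = 1 then none else some ((i : Int) + t.length - 1)), acc) := by
        rw [htr, goA_append, goA_runNone t htne htall]
      set P : Option Int := if t.length = 1 then none else some ((i : Int) + t.length - 1) with hP
      set res' := if 2 ≤ t.length then acc ++ [((i : Int), (i : Int) + t.length - 1)] else acc
        with hres
      have hbrk : pvBrk (some (i : Int), P, acc) = (none, none, res') := by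
        rw [hP, hres]
        by_cases h1 : t.length = 1
        · simp [h1, pvBrk]
        · have h2 : 2 ≤ t.length := by omega
          simp [h1, h2, pvBrk]
      have hstep : altLoop arr i acc = altLoop arr j res' := by
        rw [altLoop, if_pos h]
        simp only [hskip]
        congr 1
        · omega
        · rw [hres]
          have hsub : i + t.length - i = t.length := by omega
          rw [hsub]
          by_cases h2 : 2 ≤ t.length
          · rw [if_pos h2, if_pos h2]
            simp only [hj]
            push_cast
            ring_nf
          · rw [if_neg h2, if_neg h2]
      rcases hr' : r with _ | ⟨z, r'⟩
      · -- run reaches the end of the array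
        have hjlen : arr.length ≤ j := by
          have hnil : arr.drop j = [] := by rw [hdropj, hr']
          rw [List.drop_eq_nil_iff] at hnil
          exact hnil
        rw [hA, hr']
        simp only [goA]
        rw [hbrk, hstep, altLoop, if_neg (by omega)]
      · -- run is followed by a zero at index j
        have hjlt : j < arr.length := by
          by_contra hc
          have hnil : arr.drop j = [] := List.drop_eq_nil_of_le (by omega)
          rw [hdropj, hr'] at hnil
          exact List.cons_ne_nil _ _ hnil
        have hgetj : arr.getD j 0 = arr[j] := List.getD_eq_getElem arr 0 hjlt
        have hdj : arr.drop j = arr[j] :: arr.drop (j + 1) := List.drop_eq_getElem_cons hjlt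
        have hzr : z = arr[j] ∧ r' = arr.drop (j + 1) := by
          rw [hdropj, hr'] at hdj
          injection hdj with h1 h2
          exact ⟨h1, h2⟩
        have hzj : arr[j] = 0 := by
          have hs := altSkipRun_stop arr i (by rw [hskip]; exact hjlt)
          rw [hskip] at hs
          rw [hgetj] at hs
          exact hs
        rw [hA, hr']
        simp only [goA]
        rw [if_neg (by simp [hzr.1, hzj]), hbrk]
        have hrec := main_lemma arr (j + 1) res'
        rw [hstep, altLoop, if_pos hjlt]
        have hskipj : altSkipRun arr j = j := by
          rw [altSkipRun, if_pos hjlt, hgetj]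
          simp [hzj]
        simp only [hskipj, show ¬ (2 ≤ j - j) from by omega, if_false,
          show max j (j + 1) = j + 1 from by omega]
        rw [← hrec, hzr.2]
        simp only [hj]
        push_cast
        ring_nf
  · rw [altLoop, if_neg h, List.drop_eq_nil_of_le (by omega)]
    simp [goA, pvBrk]
termination_by arr.length - i
decreasing_by all_goals omega

-- ===== VERDICT (by name: the statement is the Claim_ definition above) =====
theorem fund_cont_subsec_spec : Claim_equal_fund_cont_subsec := by
  intro arr _
  unfold Spec_fund_cont_subsec fund_cont_subsec fund_cont_subsec_alt
  rw [foldl_enumerate_goA]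
  have := main_lemma arr 0 []
  simpa using this
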